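-- pv_equiv track=rewrite | github.com/sukhada-sukhada/lc4eu | USR-to-hindi/common.py | add_discourse_elements
-- ===== SOURCE A (Python) =====
-- discourse_dict = {'vyabhicara': 'paranwu', 'samuccaya': 'Ora', 'karya-karana': 'isase', 'viroXI': 'lekina'}
--
-- def add_discourse_elements(discourse_data, POST_PROCESS_OUTPUT):
--     # discourse element value added to sentence as per the element
--     #
--     found = False
--     if len(discourse_data) <= 0:
--         return POST_PROCESS_OUTPUT
--     else:
--         word = ''
--         for data_values in discourse_data:
--             for element in discourse_dict:
--                 if element in data_values:
--                     word = discourse_dict[element]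
--                     found = True
--         if found:
--             POST_PROCESS_OUTPUT = word + " " +POST_PROCESS_OUTPUT
--
--     return POST_PROCESS_OUTPUT
-- ===== SOURCE B (Python) =====
-- DISCOURSE_ITEMS = [('vyabhicara', 'paranwu'), ('samuccaya', 'Ora'),
--                    ('karya-karana', 'isase'), ('viroXI', 'lekina')]
--
-- def add_discourse_elements(discourse_data, POST_PROCESS_OUTPUT):
--     if len(discourse_data) <= 0:
--         return POST_PROCESS_OUTPUT
--     # scan from the back: the last data value containing any connector decides,
--     # and inside it the last matching connector (in dict insertion order) wins
--     for data_values in reversed(discourse_data):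
--         matches = [w for k, w in DISCOURSE_ITEMS if k in data_values]
--         if matches:
--             return matches[-1] + " " + POST_PROCESS_OUTPUT
--     return POST_PROCESS_OUTPUT
-- ===== Notes on version B (the rewrite author's own statement) =====
-- stated objective: alternative
-- what changed: Instead of A's full forward sweep that keeps overwriting word and a found flag, B walks discourse_data from the back, stops at the first element containing any connector key, and returns the last matching connector's word immediately (early return, no flag, no overwrite state).
import Mathlib
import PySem

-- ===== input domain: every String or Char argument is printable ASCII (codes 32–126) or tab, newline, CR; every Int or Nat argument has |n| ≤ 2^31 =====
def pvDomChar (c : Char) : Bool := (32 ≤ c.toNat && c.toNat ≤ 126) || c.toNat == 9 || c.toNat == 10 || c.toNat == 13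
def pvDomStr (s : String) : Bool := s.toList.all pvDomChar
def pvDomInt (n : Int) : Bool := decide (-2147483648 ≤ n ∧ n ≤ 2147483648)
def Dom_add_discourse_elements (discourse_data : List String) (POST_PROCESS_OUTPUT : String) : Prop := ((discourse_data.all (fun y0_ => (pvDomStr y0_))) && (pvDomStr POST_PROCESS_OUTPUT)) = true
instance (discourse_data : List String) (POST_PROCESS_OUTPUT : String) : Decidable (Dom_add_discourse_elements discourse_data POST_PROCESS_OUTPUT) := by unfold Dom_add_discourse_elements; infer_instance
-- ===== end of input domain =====

-- B replaces A's forward sweep-and-overwrite (word + found flag) by a backwards scan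
-- that returns at the first data value containing a connector: alternative decomposition.
-- ===== PORT A =====
-- module-level dict 'discourse_dict' (insertion order); iterating it yields the keys,
-- and dict[element] is the paired value (keys are distinct, so first match = the pair).
def discourse_dict : List (String × String) :=
  [("vyabhicara", "paranwu"), ("samuccaya", "Ora"), ("karya-karana", "isase"), ("viroXI", "lekina")]

def add_discourse_elements (discourse_data : List String) (POST_PROCESS_OUTPUT : String) : String :=
  if discourse_data.length ≤ 0 then POST_PROCESS_OUTPUT
  else
    -- state (word, found): 'for data_values in discourse_data: for element in discourse_dict: …'
    let st := discourse_data.foldl (fun (st : String × Bool) data_values =>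
      discourse_dict.foldl (fun (st : String × Bool) kv =>
        if PySem.Str.isIn kv.1 data_values then (kv.2, true) else st) st)
      ("", false)
    if st.2 then st.1 ++ " " ++ POST_PROCESS_OUTPUT else POST_PROCESS_OUTPUT

-- ===== PORT B =====
def DISCOURSE_ITEMS : List (String × String) :=
  [("vyabhicara", "paranwu"), ("samuccaya", "Ora"), ("karya-karana", "isase"), ("viroXI", "lekina")]

-- 'for data_values in reversed(discourse_data): …' with an early return
def adeGo (l : List String) (POST_PROCESS_OUTPUT : String) : String :=
  match l with
  | [] => POST_PROCESS_OUTPUT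
  | data_values :: rest =>
      let ms := (DISCOURSE_ITEMS.filter (fun kv => PySem.Str.isIn kv.1 data_values)).map Prod.snd
      match ms.getLast? with
      | some w => w ++ " " ++ POST_PROCESS_OUTPUT
      | none => adeGo rest POST_PROCESS_OUTPUT

def add_discourse_elements_alt (discourse_data : List String) (POST_PROCESS_OUTPUT : String) : String :=
  if discourse_data.length ≤ 0 then POST_PROCESS_OUTPUT
  else adeGo discourse_data.reverse POST_PROCESS_OUTPUT

-- ===== PRECONDITION & SPEC =====
def Spec_add_discourse_elements (discourse_data : List String) (POST_PROCESS_OUTPUT : String) (out : String) : Prop := out = add_discourse_elements_alt discourse_data POST_PROCESS_OUTPUT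
instance (discourse_data : List String) (POST_PROCESS_OUTPUT : String) (out : String) : Decidable (Spec_add_discourse_elements discourse_data POST_PROCESS_OUTPUT out) := by unfold Spec_add_discourse_elements; infer_instance

-- ===== CLAIM (what is proved, stated in full; the proofs are below) =====
def Claim_equal_add_discourse_elements : Prop := ∀ (discourse_data : List String) (POST_PROCESS_OUTPUT : String), Dom_add_discourse_elements discourse_data POST_PROCESS_OUTPUT → Spec_add_discourse_elements discourse_data POST_PROCESS_OUTPUT (add_discourse_elements discourse_data POST_PROCESS_OUTPUT)

-- ===== LEMMAS AND PROOFS =====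

-- the connector word a single data value contributes (last matching key wins), if any
def adeM (dv : String) : Option String :=
  ((DISCOURSE_ITEMS.filter (fun kv => PySem.Str.isIn kv.1 dv)).map Prod.snd).getLast?

lemma adeM_def (dv : String) :
    ((DISCOURSE_ITEMS.filter (fun kv => PySem.Str.isIn kv.1 dv)).map Prod.snd).getLast?
      = adeM dv := rfl

-- A's inner loop over any item list: last matching value wins, flag set iff some match
lemma ade_inner_fold (dv : String) (items : List (String × String)) (st : String × Bool) :
    items.foldl (fun (st : String × Bool) kv =>
        if PySem.Str.isIn kv.1 dv then (kv.2, true) else st) st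
      = match ((items.filter (fun kv => PySem.Str.isIn kv.1 dv)).map Prod.snd).getLast? with
        | some w => (w, true)
        | none => st := by
  induction items generalizing st with
  | nil => rfl
  | cons kv t ih =>
      rw [List.foldl_cons, List.filter_cons]
      by_cases h : PySem.Str.isIn kv.1 dv
      · rw [if_pos h, if_pos h, List.map_cons, ih]
        rcases hl : (t.filter (fun kv => PySem.Str.isIn kv.1 dv)).map Prod.snd with _ | ⟨b, l'⟩
        · rw [hl]; rfl
        · rw [hl, List.getLast?_cons_cons]
          rcases hg : (b :: l').getLast? with _ | w
          · simp at hg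
          · rfl
      · rw [if_neg h, if_neg h, ih]

-- A's inner loop over the module dict, phrased through adeM
lemma ade_inner_fold' (dv : String) (st : String × Bool) :
    discourse_dict.foldl (fun (st : String × Bool) kv =>
        if PySem.Str.isIn kv.1 dv then (kv.2, true) else st) st
      = match adeM dv with
        | some w => (w, true)
        | none => st :=
  ade_inner_fold dv DISCOURSE_ITEMS st

-- A's outer loop = first contributing data value scanning from the back
lemma ade_outer_fold (dd : List String) (st : String × Bool) :
    dd.foldl (fun (st : String × Bool) dv =>
        discourse_dict.foldl (fun (st : String × Bool) kv =>
          if PySem.Str.isIn kv.1 dv then (kv.2, true) else st) st) st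
      = match dd.reverse.findSome? adeM with
        | some w => (w, true)
        | none => st := by
  induction dd generalizing st with
  | nil => rfl
  | cons dv t ih =>
      rw [List.foldl_cons, ih, List.reverse_cons, List.findSome?_append]
      rcases hr : t.reverse.findSome? adeM with _ | w
      · rw [ade_inner_fold']
        rcases hm : adeM dv with _ | w
        · simp [List.findSome?_nil, hm]
        · simp [hm]
      · simp

-- B's scan: early return at the first contributing data value
lemma adeGo_eq (l : List String) (out : String) :
    adeGo l out = match l.findSome? adeM with
      | some w => w ++ " " ++ out
      | none => out := by
  induction l with
  | nil => rfl
  | cons dv t ih =>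
      rw [adeGo, List.findSome?_cons]
      simp only [adeM_def]
      rcases hm : adeM dv with _ | w
      · simpa using ih
      · rfl

-- ===== VERDICT (by name: the statement is the Claim_ definition above) =====
theorem add_discourse_elements_spec : Claim_equal_add_discourse_elements := by
  intro dd out _
  unfold Spec_add_discourse_elements add_discourse_elements add_discourse_elements_alt
  by_cases h : dd.length ≤ 0
  · rw [if_pos h, if_pos h]
  · rw [if_neg h, if_neg h]
    simp only [ade_outer_fold, adeGo_eq]
    rcases dd.reverse.findSome? adeM with _ | w <;> simp
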